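-- pv_equiv track=rewrite | github.com/sofia1922/python | reverse_words.py | reverse_text
-- ===== SOURCE A (Python) =====
-- def reverse_text(text):
--     """
--     Розвертає всі слова у вхідному рядку text, зберігаючи небуквенні символи на місці.
--
--     Приклади:
--     >>> reverse_text("abcd efgh")
--     'dcba hgfe'
--     >>> reverse_text("a1bcd efg!h")
--     'd1cba hgf!e'
--     """
--     words = text.split()
--     reversed_words = []
--
--     for word in words:
--         letters = [char for char in word if char.isalpha()]
--         reversed_letters = iter(letters[::-1])
--
--         result_word = [
--             next(reversed_letters) if char.isalpha() else char
--             for char in word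
--         ]
--         reversed_words.append("".join(result_word))
--
--     return " ".join(reversed_words)
-- ===== SOURCE B (Python) =====
-- def reverse_text(text):
--     words = []
--     for w in text.split():
--         cs = list(w)
--         l, r = 0, len(cs) - 1
--         while l < r:
--             if not cs[l].isalpha():
--                 l += 1
--             elif not cs[r].isalpha():
--                 r -= 1
--             else:
--                 cs[l], cs[r] = cs[r], cs[l]
--                 l += 1
--                 r -= 1
--         words.append("".join(cs))
--     return " ".join(words)
-- ===== Notes on version B (the rewrite author's own statement) =====
-- stated objective: alternative
-- what changed: Per word, instead of building the filtered letter list, reversing it and refilling via an iterator, B reverses the letters in place with the classic two-pointer swap loop (l from the left, r from the right, skipping non-letters), keeping only two indices.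
import Mathlib
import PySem

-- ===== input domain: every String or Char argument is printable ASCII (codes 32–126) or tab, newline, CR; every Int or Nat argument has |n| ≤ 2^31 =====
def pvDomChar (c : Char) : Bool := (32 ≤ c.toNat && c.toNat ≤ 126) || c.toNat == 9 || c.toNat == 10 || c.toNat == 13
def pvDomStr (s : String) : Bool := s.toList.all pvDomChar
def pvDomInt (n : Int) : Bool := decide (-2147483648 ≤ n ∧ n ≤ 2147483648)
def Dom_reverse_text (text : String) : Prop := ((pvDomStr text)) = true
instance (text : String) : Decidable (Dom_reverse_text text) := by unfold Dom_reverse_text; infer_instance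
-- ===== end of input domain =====

-- B reverses the letters of each word in place with a two-pointer swap loop instead of
-- A's filter + reversed-iterator refill; same return value, no claimed speed difference.

-- ===== PORT A =====
-- the list comprehension 'next(reversed_letters) if char.isalpha() else char' with its
-- iterator state, ported as a recursion over the word carrying the remaining letters;
-- the [] branch for an alpha char is unreachable (the letters always suffice: Python's
-- next() never raises here), we keep the char there.
def pvFill : List Char → List Char → List Char
  | [], _ => []
  | c :: cs, it =>
    if PySem.Chars.isalpha c then
      match it with
      | y :: it' => y :: pvFill cs it'
      | [] => c :: pvFill cs []
    else c :: pvFill cs it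

def reverse_text (text : String) : String :=
  let words := PySem.Str.split₀ text
  let reversed_words := words.foldl (fun acc word =>
    let letters := word.toList.filter (fun c => PySem.Chars.isalpha c)
    let revLetters := (PySem.List.slice? letters none none (-1)).getD []
    let result_word := pvFill word.toList revLetters
    acc ++ [String.ofList (PySem.Chars.join [] (result_word.map (fun c => [c])))]) []
  PySem.Str.join " " reversed_words

-- ===== PORT B =====
-- the 'while l < r' two-pointer loop of Source B, ported as recursion on r - l
def pvTp (cs : List Char) (l r : Nat) : List Char :=
  if _h : l < r then
    if PySem.Chars.isalpha (cs.getD l 'x') = false then pvTp cs (l + 1) r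
    else if PySem.Chars.isalpha (cs.getD r 'x') = false then pvTp cs l (r - 1)
    else pvTp ((cs.set l (cs.getD r 'x')).set r (cs.getD l 'x')) (l + 1) (r - 1)
  else cs
termination_by r - l
decreasing_by all_goals omega

def reverse_text_alt (text : String) : String :=
  let words := (PySem.Str.split₀ text).foldl (fun acc w =>
    let cs := w.toList
    acc ++ [String.ofList (pvTp cs 0 (cs.length - 1))]) []
  PySem.Str.join " " words

-- ===== PRECONDITION & SPEC =====
def Spec_reverse_text (text : String) (out : String) : Prop := out = reverse_text_alt text
instance (text : String) (out : String) : Decidable (Spec_reverse_text text out) := by unfold Spec_reverse_text; infer_instance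

-- ===== CLAIM (what is proved, stated in full; the proofs are below) =====
def Claim_equal_reverse_text : Prop := ∀ (text : String), Dom_reverse_text text → Spec_reverse_text text (reverse_text text)

-- ===== LEMMAS AND PROOFS =====

-- proof-side view of the two-pointer loop: structural recursion from both ends
def pvRev : List Char → List Char
  | [] => []
  | [c] => [c]
  | c :: d0 :: rest =>
    if PySem.Chars.isalpha c = false then c :: pvRev (d0 :: rest)
    else if PySem.Chars.isalpha ((d0 :: rest).getLast (by simp)) = false then
      pvRev (c :: (d0 :: rest).dropLast) ++ [(d0 :: rest).getLast (by simp)]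
    else (d0 :: rest).getLast (by simp) :: pvRev ((d0 :: rest).dropLast) ++ [c]
termination_by w => w.length
decreasing_by all_goals simp [List.length_dropLast]

theorem pvRev_cons_nonalpha (c : Char) (cs : List Char) (h : cs ≠ [])
    (hc : PySem.Chars.isalpha c = false) : pvRev (c :: cs) = c :: pvRev cs := by
  cases cs with
  | nil => simp at h
  | cons d0 rest => simp [pvRev, hc]

theorem pvRev_concat_nonalpha (c : Char) (mid : List Char) (d : Char)
    (hc : PySem.Chars.isalpha c = true) (hd : PySem.Chars.isalpha d = false) :
    pvRev (c :: (mid ++ [d])) = pvRev (c :: mid) ++ [d] := by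
  cases mid with
  | nil => simp [pvRev, hc, hd]
  | cons m0 mid' =>
    have h1 : ((m0 :: (mid' ++ [d])).getLast (by simp)) = d := by
      simp
    have h2 : (m0 :: (mid' ++ [d])).dropLast = m0 :: mid' := by
      rw [show m0 :: (mid' ++ [d]) = (m0 :: mid') ++ [d] by simp, List.dropLast_concat]
    simp only [List.cons_append, pvRev, hc, h1, h2, hd]
    simp

theorem pvRev_concat_alpha (c : Char) (mid : List Char) (d : Char)
    (hc : PySem.Chars.isalpha c = true) (hd : PySem.Chars.isalpha d = true) :
    pvRev (c :: (mid ++ [d])) = d :: pvRev mid ++ [c] := by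
  cases mid with
  | nil => simp [pvRev, hc, hd]
  | cons m0 mid' =>
    have h1 : ((m0 :: (mid' ++ [d])).getLast (by simp)) = d := by
      simp
    have h2 : (m0 :: (mid' ++ [d])).dropLast = m0 :: mid' := by
      rw [show m0 :: (mid' ++ [d]) = (m0 :: mid') ++ [d] by simp, List.dropLast_concat]
    simp only [List.cons_append, pvRev, hc, h1, h2, hd]
    simp

theorem pvFill_snoc_nonalpha (d : Char) (hd : PySem.Chars.isalpha d = false) :
    ∀ (xs ys : List Char), pvFill (xs ++ [d]) ys = pvFill xs ys ++ [d] := by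
  intro xs
  induction xs with
  | nil => intro ys; simp [pvFill, hd]
  | cons c cs ih =>
    intro ys
    by_cases hc : PySem.Chars.isalpha c
    · cases ys with
      | nil => simp [pvFill, hc, ih]
      | cons y ys' => simp [pvFill, hc, ih]
    · simp [pvFill, hc, ih]

theorem pvFill_snoc_alpha (d : Char) (hd : PySem.Chars.isalpha d = true) :
    ∀ (xs ys : List Char) (y : Char),
      ys.length = (xs.filter (fun c => PySem.Chars.isalpha c)).length →
      pvFill (xs ++ [d]) (ys ++ [y]) = pvFill xs ys ++ [y] := by
  intro xs
  induction xs with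
  | nil =>
    intro ys y hlen
    have : ys = [] := List.eq_nil_of_length_eq_zero (by simpa using hlen)
    subst this
    simp [pvFill, hd]
  | cons c cs ih =>
    intro ys y hlen
    by_cases hc : PySem.Chars.isalpha c
    · cases ys with
      | nil => simp [hc] at hlen
      | cons y0 ys' =>
        simp [hc] at hlen
        simp [pvFill, hc, ih ys' y hlen]
    · simp [hc] at hlen
      simp [pvFill, hc, ih ys y hlen]

theorem pvRev_eq_pvFill : ∀ (w : List Char),
    pvRev w = pvFill w ((w.filter (fun c => PySem.Chars.isalpha c)).reverse) := by
  have H : ∀ (n : ℕ) (w : List Char), w.length = n →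
      pvRev w = pvFill w ((w.filter (fun c => PySem.Chars.isalpha c)).reverse) := by
    intro n
    induction n using Nat.strong_induction_on with
    | _ n ih =>
      intro w hlen
      match w, hlen with
      | [], _ => simp [pvRev, pvFill]
      | [c], _ => by_cases hc : PySem.Chars.isalpha c <;> simp [pvRev, pvFill, hc]
      | c :: c1 :: cs', hlen =>
        have hn : cs'.length + 2 = n := by simpa using hlen
        have hne : (c1 :: cs' : List Char) ≠ [] := by simp
        by_cases hc : PySem.Chars.isalpha c = false
        · rw [pvRev_cons_nonalpha c (c1 :: cs') hne hc]
          rw [show List.filter (fun c => PySem.Chars.isalpha c) (c :: c1 :: cs')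
                = List.filter (fun c => PySem.Chars.isalpha c) (c1 :: cs') by
            simp only [List.filter_cons, hc]; simp]
          rw [show pvFill (c :: c1 :: cs')
                  ((List.filter (fun c => PySem.Chars.isalpha c) (c1 :: cs')).reverse)
                = c :: pvFill (c1 :: cs')
                  ((List.filter (fun c => PySem.Chars.isalpha c) (c1 :: cs')).reverse) by
            simp [pvFill, hc]]
          rw [ih (c1 :: cs').length (by simp only [List.length_cons]; omega) (c1 :: cs') rfl]
        · have hca : PySem.Chars.isalpha c = true := by
            revert hc; cases PySem.Chars.isalpha c <;> simp
          obtain ⟨mid, dl, hmd⟩ : ∃ mid dl, (c1 :: cs' : List Char) = mid ++ [dl] := by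
            rcases List.eq_nil_or_concat (c1 :: cs') with h | ⟨mid, dl, h⟩
            · exact absurd h hne
            · exact ⟨mid, dl, by simpa using h⟩
          have hm : mid.length = cs'.length := by
            have : (mid ++ [dl]).length = (c1 :: cs').length := by rw [hmd]
            simp at this; omega
          rw [hmd]
          by_cases hdl : PySem.Chars.isalpha dl = false
          · rw [pvRev_concat_nonalpha c mid dl hca hdl]
            rw [show List.filter (fun c => PySem.Chars.isalpha c) (c :: (mid ++ [dl]))
                  = List.filter (fun c => PySem.Chars.isalpha c) (c :: mid) by
              simp only [List.filter_append, List.filter_cons, List.filter_nil, hdl]; simp]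
            rw [show (c :: (mid ++ [dl]) : List Char) = (c :: mid) ++ [dl] by simp]
            rw [pvFill_snoc_nonalpha dl hdl]
            rw [ih (c :: mid).length (by simp only [List.length_cons]; omega) (c :: mid) rfl]
          · have hda : PySem.Chars.isalpha dl = true := by
              revert hdl; cases PySem.Chars.isalpha dl <;> simp
            rw [pvRev_concat_alpha c mid dl hca hda]
            rw [show List.filter (fun c => PySem.Chars.isalpha c) (c :: (mid ++ [dl]))
                  = c :: (List.filter (fun c => PySem.Chars.isalpha c) mid ++ [dl]) by
              simp only [List.filter_append, List.filter_cons, List.filter_nil, hca, hda]; simp]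
            rw [show ((c :: (List.filter (fun c => PySem.Chars.isalpha c) mid ++ [dl])).reverse)
                  = dl :: ((List.filter (fun c => PySem.Chars.isalpha c) mid).reverse ++ [c]) by
              simp]
            rw [show pvFill (c :: (mid ++ [dl]))
                    (dl :: ((List.filter (fun c => PySem.Chars.isalpha c) mid).reverse ++ [c]))
                  = dl :: pvFill (mid ++ [dl])
                    ((List.filter (fun c => PySem.Chars.isalpha c) mid).reverse ++ [c]) by
              simp [pvFill, hca]]
            rw [pvFill_snoc_alpha dl hda mid _ c (by simp)]
            rw [ih mid.length (by omega) mid rfl]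
            simp
  exact fun w => H w.length w rfl

theorem pvGetD_mid (pre t : List Char) (x : Char) (d : Char) :
    (pre ++ x :: t).getD pre.length d = x := by
  simp [List.getD]

theorem pvSet_mid (pre t : List Char) (x y : Char) :
    (pre ++ x :: t).set pre.length y = pre ++ y :: t := by
  simp

theorem pvTp_decomp : ∀ (n : ℕ) (mid : List Char), mid.length = n →
    ∀ (pre post : List Char),
      pvTp (pre ++ mid ++ post) pre.length (pre.length + mid.length - 1)
        = pre ++ pvRev mid ++ post := by
  intro n
  induction n using Nat.strong_induction_on with
  | _ n ih =>
    intro mid hlen pre post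
    match mid, hlen with
    | [], hlen =>
      rw [pvTp]
      simp [pvRev]
    | [c], hlen =>
      rw [pvTp]
      simp [pvRev]
    | c :: d0 :: rest, hlen =>
      have hn : rest.length + 2 = n := by simpa using hlen
      have hlt : pre.length < pre.length + (c :: d0 :: rest).length - 1 := by
        simp only [List.length_cons]; omega
      have hd_ne : (d0 :: rest : List Char) ≠ [] := by simp
      have hdecomp : (d0 :: rest).dropLast ++ [(d0 :: rest).getLast hd_ne] = d0 :: rest :=
        List.dropLast_concat_getLast hd_ne
      set d := (d0 :: rest).getLast hd_ne with hd_def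
      set mid1 := (d0 :: rest).dropLast with hmid_def
      have hm1 : mid1.length = rest.length := by
        simp [hmid_def]
      have hcs : (c :: d0 :: rest : List Char) = c :: (mid1 ++ [d]) := by
        rw [hdecomp]
      have hgl : ((pre ++ (c :: d0 :: rest) ++ post).getD pre.length 'x') = c := by
        rw [show pre ++ (c :: d0 :: rest) ++ post = pre ++ c :: ((d0 :: rest) ++ post) by simp]
        exact pvGetD_mid pre _ c 'x'
      have hr_idx : pre.length + (c :: d0 :: rest).length - 1 = (pre ++ c :: mid1).length := by
        simp only [List.length_cons, List.length_append, hm1]; omega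
      have hgr : ((pre ++ (c :: d0 :: rest) ++ post).getD (pre.length + (c :: d0 :: rest).length - 1) 'x') = d := by
        rw [hr_idx, show pre ++ (c :: d0 :: rest) ++ post = (pre ++ c :: mid1) ++ d :: post by
          rw [hcs]; simp]
        exact pvGetD_mid (pre ++ c :: mid1) post d 'x'
      rw [pvTp, dif_pos hlt, hgl, hgr]
      by_cases hc : PySem.Chars.isalpha c = false
      · -- left char is not a letter: advance l
        rw [if_pos hc]
        have e1 : pre ++ (c :: d0 :: rest) ++ post = (pre ++ [c]) ++ (d0 :: rest) ++ post := by simp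
        have e2 : pre.length + 1 = (pre ++ [c]).length := by simp
        have e3 : pre.length + (c :: d0 :: rest).length - 1
            = (pre ++ [c]).length + (d0 :: rest).length - 1 := by
          simp only [List.length_cons, List.length_append, List.length_nil]; omega
        rw [e1, e2, e3, ih (d0 :: rest).length (by simp only [List.length_cons]; omega)
          (d0 :: rest) rfl (pre ++ [c]) post]
        rw [pvRev_cons_nonalpha c (d0 :: rest) hd_ne hc]
        simp
      · have hca : PySem.Chars.isalpha c = true := by
          revert hc; cases PySem.Chars.isalpha c <;> simp
        rw [if_neg hc]
        by_cases hdl : PySem.Chars.isalpha d = false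
        · -- right char is not a letter: retreat r
          rw [if_pos hdl]
          have e1 : pre ++ (c :: d0 :: rest) ++ post = pre ++ (c :: mid1) ++ (d :: post) := by
            rw [hcs]; simp
          have e2 : pre.length + (c :: d0 :: rest).length - 1 - 1
              = pre.length + (c :: mid1).length - 1 := by
            simp only [List.length_cons, hm1]; omega
          rw [e1, e2, ih (c :: mid1).length (by simp only [List.length_cons, hm1]; omega)
            (c :: mid1) rfl pre (d :: post)]
          rw [hcs, pvRev_concat_nonalpha c mid1 d hca hdl]
          simp
        · -- both letters: swap and move both pointers
          have hda : PySem.Chars.isalpha d = true := by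
            revert hdl; cases PySem.Chars.isalpha d <;> simp
          rw [if_neg hdl]
          have eset : ((pre ++ (c :: d0 :: rest) ++ post).set pre.length d).set
                (pre.length + (c :: d0 :: rest).length - 1) c
              = (pre ++ [d]) ++ mid1 ++ ([c] ++ post) := by
            rw [show pre ++ (c :: d0 :: rest) ++ post = pre ++ c :: ((d0 :: rest) ++ post) by simp]
            rw [pvSet_mid pre _ c d]
            rw [show pre ++ d :: (d0 :: rest ++ post) = (pre ++ d :: mid1) ++ d :: post by
              conv_lhs => rw [← hdecomp]
              simp]
            rw [hr_idx, show (pre ++ c :: mid1).length = (pre ++ d :: mid1).length by simp]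
            rw [pvSet_mid (pre ++ d :: mid1) post d c]
            simp
          rw [eset]
          have e2 : pre.length + 1 = (pre ++ [d]).length := by simp
          have e3 : pre.length + (c :: d0 :: rest).length - 1 - 1
              = (pre ++ [d]).length + mid1.length - 1 := by
            simp only [List.length_cons, List.length_append, List.length_nil, hm1]; omega
          rw [e2, e3, ih mid1.length (by simp only [hm1]; omega) mid1 rfl (pre ++ [d]) ([c] ++ post)]
          rw [hcs, pvRev_concat_alpha c mid1 d hca hda]
          simp

theorem pvTp_word (cs : List Char) :
    pvTp cs 0 (cs.length - 1)
      = pvFill cs ((cs.filter (fun c => PySem.Chars.isalpha c)).reverse) := by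
  rw [show pvTp cs 0 (cs.length - 1)
        = pvTp ([] ++ cs ++ []) ([] : List Char).length (([] : List Char).length + cs.length - 1) by simp]
  rw [pvTp_decomp cs.length cs rfl [] []]
  simp [pvRev_eq_pvFill]

theorem pvFoldl_words (f g : String → String) (h : ∀ w, f w = g w) :
    ∀ (ws : List String) (acc : List String),
      ws.foldl (fun a w => a ++ [f w]) acc = ws.foldl (fun a w => a ++ [g w]) acc := by
  intro ws
  induction ws with
  | nil => intro acc; rfl
  | cons w ws ih => intro acc; simp only [List.foldl]; rw [h w, ih]

-- ===== VERDICT (by name: the statement is the Claim_ definition above) =====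
theorem reverse_text_spec : Claim_equal_reverse_text := by
  intro text _
  unfold Spec_reverse_text reverse_text reverse_text_alt
  simp only [PySem.List.slice?_none_none_neg_one, Option.getD_some,
    PySem.Chars.join_nil_singletons]
  rw [pvFoldl_words
    (fun word => String.ofList (pvFill word.toList
      ((word.toList.filter (fun c => PySem.Chars.isalpha c)).reverse)))
    (fun w => String.ofList (pvTp w.toList 0 (w.toList.length - 1)))
    (fun w => congrArg String.ofList (pvTp_word w.toList).symm)]
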